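-- pv_equiv track=rewrite | github.com/paredessimonati/Cursos | codewars/same.py | comp
-- ===== SOURCE A (Python) =====
-- def comp(a, b):
--     if a is None or b is None:
--         return False
--     if len(a) != len(b):
--         return False
--     for i, number in enumerate(sorted(a, key = abs)):
--         if abs(number) * abs(number) != sorted(b)[i]:
--             return False
--     return True
-- ===== SOURCE B (Python) =====
-- from collections import Counter
--
-- def comp(a, b):
--     if a is None or b is None:
--         return False
--     if len(a) != len(b):
--         return False
--     return Counter(x * x for x in a) == Counter(b)
-- ===== Notes on version B (the rewrite author's own statement) =====
-- stated objective: idiomatic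
-- what changed: Replaces the sort-by-abs pairwise indexing loop (which re-sorts b on every iteration) with a single Counter (multiset) comparison of the squares of a against b, eliminating all sorting.
import Mathlib
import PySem

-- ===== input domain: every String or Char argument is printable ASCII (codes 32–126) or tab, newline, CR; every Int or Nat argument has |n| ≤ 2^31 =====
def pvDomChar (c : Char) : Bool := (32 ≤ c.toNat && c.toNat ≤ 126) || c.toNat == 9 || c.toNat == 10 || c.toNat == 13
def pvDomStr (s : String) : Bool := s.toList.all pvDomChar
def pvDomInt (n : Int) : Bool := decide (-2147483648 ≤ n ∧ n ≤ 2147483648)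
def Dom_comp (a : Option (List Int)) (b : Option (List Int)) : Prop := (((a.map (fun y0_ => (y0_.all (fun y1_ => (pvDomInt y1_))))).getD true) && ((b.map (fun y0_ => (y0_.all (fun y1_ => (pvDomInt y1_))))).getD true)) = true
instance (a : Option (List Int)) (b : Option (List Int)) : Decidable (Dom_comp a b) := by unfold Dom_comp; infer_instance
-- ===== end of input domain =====

-- B replaces A's sort-by-abs pairwise indexing loop by one Counter (multiset)
-- comparison of the squares of a against b; objective: idiomatic.

-- ===== PORT A =====
-- the 'for i, number in enumerate(sorted(a, key=abs))' loop with its early returns;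
-- 'sorted(b)[i]' is recomputed each iteration exactly as in the Python.
def compLoopA (xb : List Int) : List (Int × Int) → Bool
  | [] => true
  | (i, number) :: rest =>
    match PySem.List.pyGet? (PySem.List.sorted xb (fun x => x) false) i with
    | none => false  -- Python IndexError: unreachable under the equal-length guard
    | some v => if |number| * |number| ≠ v then false else compLoopA xb rest

def comp (a : Option (List Int)) (b : Option (List Int)) : Bool :=
  match a, b with
  | none, _ => false
  | _, none => false
  | some xa, some xb =>
    if xa.length ≠ xb.length then false
    else compLoopA xb (PySem.List.enumerate (PySem.List.sorted xa (fun x => |x|) false))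

-- ===== PORT B =====
-- Counter(x*x for x in a) == Counter(b): dict equality = same key→count mapping, both ways.
def comp_alt (a : Option (List Int)) (b : Option (List Int)) : Bool :=
  match a, b with
  | none, _ => false
  | _, none => false
  | some xa, some xb =>
    if xa.length ≠ xb.length then false
    else
      let c1 := PySem.Dict.counter (xa.map (fun x => x * x))
      let c2 := PySem.Dict.counter xb
      c1.items.all (fun kv => c2.getD kv.1 0 == kv.2) &&
        c2.items.all (fun kv => c1.getD kv.1 0 == kv.2)

-- ===== PRECONDITION & SPEC =====
def Spec_comp (a : Option (List Int)) (b : Option (List Int)) (out : Bool) : Prop := out = comp_alt a b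
instance (a : Option (List Int)) (b : Option (List Int)) (out : Bool) : Decidable (Spec_comp a b out) := by unfold Spec_comp; infer_instance

-- ===== CLAIM (what is proved, stated in full; the proofs are below) =====
def Claim_equal_comp : Prop := ∀ (a : Option (List Int)) (b : Option (List Int)), Dom_comp a b → Spec_comp a b (comp a b)

-- ===== LEMMAS AND PROOFS =====

-- A's loop at start index k checks the squares of l against the suffix of sorted(b) from k.
lemma compLoopA_char (xb : List Int) (l : List Int) (k : Nat)
    (h : k + l.length = (PySem.List.sorted xb (fun x => x) false).length) :
    compLoopA xb (PySem.List.enumerate l (k : Int)) = true ↔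
      l.map (fun x => x * x) = (PySem.List.sorted xb (fun x => x) false).drop k := by
  induction l generalizing k with
  | nil =>
    simp only [PySem.List.enumerate_nil, compLoopA, List.map_nil, List.length_nil] at *
    constructor
    · intro _; symm; rw [List.drop_eq_nil_iff]; omega
    · intro _; trivial
  | cons n rest ih =>
    have hk : k < (PySem.List.sorted xb (fun x => x) false).length := by
      simp only [List.length_cons] at h; omega
    rw [PySem.List.enumerate_cons]
    have hget := PySem.List.pyGet?_natCast (xs := PySem.List.sorted xb (fun x => x) false) (n := k)
    rw [compLoopA, hget, List.getElem?_eq_getElem hk]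
    simp only
    have hrec : ((k : Int) + 1) = ((k + 1 : Nat) : Int) := by push_cast; ring
    rw [hrec]
    have h' : (k + 1) + rest.length = (PySem.List.sorted xb (fun x => x) false).length := by
      simp only [List.length_cons] at h; omega
    rw [List.drop_eq_getElem_cons hk, List.map_cons]
    by_cases hc : |n| * |n| = (PySem.List.sorted xb (fun x => x) false)[k]
    · have hc' : n * n = (PySem.List.sorted xb (fun x => x) false)[k] := by
        rw [← abs_mul_abs_self]; exact hc
      simp only [hc, ne_eq, not_true_eq_false, ite_false]
      rw [ih (k+1) h', List.cons.injEq]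
      exact ⟨fun h2 => ⟨hc', h2⟩, fun hp => hp.2⟩
    · simp only [ne_eq, hc, not_false_eq_true, ite_true]
      constructor
      · intro hf; exact absurd hf (by simp)
      · intro he
        have h1 : n * n = (PySem.List.sorted xb (fun x => x) false)[k] := by
          injection he
        rw [← abs_mul_abs_self] at h1; exact absurd h1 hc

-- B's double-all is multiset equality; the bridge relates it to A's sorted comparison.
lemma comp_alt_char (xa xb : List Int) :
    ((PySem.Dict.counter (xa.map (fun x => x * x))).items.all
        (fun kv => (PySem.Dict.counter xb).getD kv.1 0 == kv.2) &&
      (PySem.Dict.counter xb).items.all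
        (fun kv => (PySem.Dict.counter (xa.map (fun x => x * x))).getD kv.1 0 == kv.2)) = true ↔
      (xa.map (fun x => x * x)).Perm xb := by
  rw [List.perm_iff_count]
  simp only [Bool.and_eq_true, List.all_eq_true, PySem.Dict.items_counter, List.mem_map,
    forall_exists_index, and_imp]
  constructor
  · rintro ⟨h1, h2⟩ v
    by_cases hva : v ∈ xa.map (fun x => x * x)
    · have := h1 (v, ((xa.map (fun x => x * x)).count v : Int)) v
        (by rw [PySem.Set.mem_ofList]; exact hva) rfl
      simp only [PySem.Dict.getD_counter, beq_iff_eq, Nat.cast_inj] at this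
      omega
    · by_cases hvb : v ∈ xb
      · have := h2 (v, (xb.count v : Int)) v (by rw [PySem.Set.mem_ofList]; exact hvb) rfl
        simp only [PySem.Dict.getD_counter, beq_iff_eq, Nat.cast_inj] at this
        omega
      · rw [List.count_eq_zero.mpr hva, List.count_eq_zero.mpr hvb]
  · intro h
    refine ⟨?_, ?_⟩ <;>
    · rintro kv v hv rfl
      simp only [PySem.Dict.getD_counter, beq_iff_eq, Nat.cast_inj]
      exact (h v).symm ▸ rfl

lemma bridge (xa xb : List Int) :
    (PySem.List.sorted xa (fun x => |x|) false).map (fun x => x * x) =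
        PySem.List.sorted xb (fun x => x) false ↔
      (xa.map (fun x => x * x)).Perm xb := by
  constructor
  · intro he
    have h1 : (xa.map (fun x => x * x)).Perm
        ((PySem.List.sorted xa (fun x => |x|) false).map (fun x => x * x)) :=
      ((PySem.List.sorted_perm xa (fun x => |x|) false).map _).symm
    rw [he] at h1
    exact h1.trans (PySem.List.sorted_perm xb (fun x => x) false)
  · intro hp
    have hperm : ((PySem.List.sorted xa (fun x => |x|) false).map (fun x => x * x)).Perm
        (PySem.List.sorted xb (fun x => x) false) :=
      (((PySem.List.sorted_perm xa (fun x => |x|) false).map _).trans hp).trans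
        (PySem.List.sorted_perm xb (fun x => x) false).symm
    have pw1 : ((PySem.List.sorted xa (fun x => |x|) false).map (fun x => x * x)).Pairwise
        (fun a b => (a : Int) ≤ b) := by
      have := PySem.List.sorted_pairwise xa (fun x => |x|)
      refine List.Pairwise.map _ ?_ this
      intro a b hab
      calc a * a = |a| * |a| := (abs_mul_abs_self a).symm
        _ ≤ |b| * |b| := mul_self_le_mul_self (abs_nonneg a) hab
        _ = b * b := abs_mul_abs_self b
    have pw2 : (PySem.List.sorted xb (fun x => x) false).Pairwise (fun a b => (a : Int) ≤ b) :=
      PySem.List.sorted_pairwise xb (fun x => x)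
    exact PySem.List.eq_of_perm_of_pairwise_le_of_injective (fun x => x)
      (fun _ _ h => h) hperm pw1 pw2

-- ===== VERDICT (by name: the statement is the Claim_ definition above) =====
theorem comp_spec : Claim_equal_comp := by
  intro a b _
  unfold Spec_comp comp comp_alt
  match a, b with
  | none, _ => rfl
  | some xa, none => rfl
  | some xa, some xb =>
    simp only
    by_cases hlen : xa.length = xb.length
    · simp only [hlen, ne_eq, not_true_eq_false, if_false]
      rw [Bool.eq_iff_iff]
      have h0 : (0 : Nat) + (PySem.List.sorted xa (fun x => |x|) false).length
          = (PySem.List.sorted xb (fun x => x) false).length := by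
        simp [PySem.List.length_sorted, hlen]
      have := compLoopA_char xb (PySem.List.sorted xa (fun x => |x|) false) 0 h0
      rw [show ((0:Nat):Int) = (0:Int) by norm_num] at this
      rw [this, List.drop_zero, bridge, comp_alt_char]
    · simp [hlen]
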